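-- pv_equiv track=rewrite | github.com/bzreinhardt/notes | reference_note_formatter.py | downgrade_headers
-- ===== SOURCE A (Python) =====
-- def downgrade_headers(content):
--     lines = content.split("\n")
--     new_lines = [lines[0]]
--     for i, line in enumerate(lines[1:]):
--         if line[0:2] == "# ":
--             new_lines.append("#"+line)
--         else:
--             new_lines.append(line)
--     return "\n".join(new_lines)
-- ===== SOURCE B (Python) =====
-- def downgrade_headers(content):
--     return content.replace("\n# ", "\n## ")
-- ===== Notes on version B (the rewrite author's own statement) =====
-- stated objective: idiomatic
-- what changed: Replaced the split-into-lines / per-line-branch / rejoin loop with a single str.replace of newline-hash-space by newline-hash-hash-space, rewriting every level-1 header after the first line in one pass.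
import Mathlib
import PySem

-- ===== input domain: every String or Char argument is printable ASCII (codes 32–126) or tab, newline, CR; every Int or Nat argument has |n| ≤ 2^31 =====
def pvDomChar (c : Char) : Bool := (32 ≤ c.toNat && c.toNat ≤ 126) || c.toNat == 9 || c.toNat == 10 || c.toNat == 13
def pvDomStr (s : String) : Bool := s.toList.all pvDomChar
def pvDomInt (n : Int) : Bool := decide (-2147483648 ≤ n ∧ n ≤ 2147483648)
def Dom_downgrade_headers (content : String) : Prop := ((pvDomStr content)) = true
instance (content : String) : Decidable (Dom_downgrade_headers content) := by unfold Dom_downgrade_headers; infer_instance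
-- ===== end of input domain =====

-- B replaces A's split/loop/join over lines by one content.replace("\n# ", "\n## ") pass (idiomatic, same result).

-- ===== PORT A =====
-- lines = content.split("\n"); new_lines = [lines[0]]; loop appending per-line; "\n".join(new_lines)
def downgrade_headers (content : String) : String :=
  let lines := PySem.Chars.splitOn content.toList ['\n']
  match lines with
  | [] => ""   -- unreachable: split always yields at least one piece
  | l0 :: rest =>
    let new_lines := rest.foldl
      (fun acc line =>
        acc ++ [if PySem.List.slice line (some 0) (some 2) = ['#', ' '] then '#' :: line else line])
      [l0]
    String.ofList (PySem.Chars.join ['\n'] new_lines)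

-- ===== PORT B =====
-- return content.replace("\n# ", "\n## ")
def downgrade_headers_alt (content : String) : String :=
  PySem.Str.replace content "\n# " "\n## "

-- ===== PRECONDITION & SPEC =====
def Spec_downgrade_headers (content : String) (out : String) : Prop := out = downgrade_headers_alt content
instance (content : String) (out : String) : Decidable (Spec_downgrade_headers content out) := by unfold Spec_downgrade_headers; infer_instance

-- ===== CLAIM (what is proved, stated in full; the proofs are below) =====
def Claim_equal_downgrade_headers : Prop := ∀ (content : String), Dom_downgrade_headers content → Spec_downgrade_headers content (downgrade_headers content)

-- ===== LEMMAS AND PROOFS =====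

-- The common spec: copy chars; after each '\n', insert '#' when the rest starts with "# ".
def pvF : List Char → List Char
  | [] => []
  | c :: t => if c = '\n' then '\n' :: ((if t.take 2 = ['#', ' '] then ['#'] else []) ++ pvF t) else c :: pvF t

-- fuel-free form of PySem.Chars.splitOn on sep = ['\n']
def pvSplitAux : List Char → List Char → List (List Char)
  | [], cur => [cur.reverse]
  | c :: t, cur => if c = '\n' then cur.reverse :: pvSplitAux t [] else pvSplitAux t (c :: cur)

-- the current line's text up to the next newline
def pvTUNL : List Char → List Char
  | [] => []
  | c :: t => if c = '\n' then [] else c :: pvTUNL t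

def pvG (line : List Char) : List Char :=
  if line.take 2 = ['#', ' '] then '#' :: line else line

theorem pv_slice_take (l : List Char) :
    PySem.List.slice l (some 0) (some 2) = l.take 2 := by
  simp [PySem.List.slice, PySem.List.clampIdx]

theorem pv_splitOn_go (fuel : Nat) :
    ∀ (l cur : List Char) (acc : List (List Char)), l.length ≤ fuel →
      PySem.Chars.splitOn.go ['\n'] fuel l cur acc = acc.reverse ++ pvSplitAux l cur := by
  induction fuel with
  | zero =>
    intro l cur acc h
    have : l = [] := List.eq_nil_of_length_eq_zero (Nat.le_zero.mp h)
    subst this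
    simp [PySem.Chars.splitOn.go, pvSplitAux]
  | succ n ih =>
    intro l cur acc h
    cases l with
    | nil => simp [PySem.Chars.splitOn.go, pvSplitAux]
    | cons c t =>
      by_cases hc : c = '\n'
      · subst hc
        have hp : List.isPrefixOf ['\n'] ('\n' :: t) = true := by
          simp [List.isPrefixOf]
        rw [PySem.Chars.splitOn.go]
        simp only [hp, if_true, List.length_singleton, List.drop_succ_cons, List.drop_zero]
        rw [ih t [] (cur.reverse :: acc) (by simpa using Nat.le_of_succ_le_succ h)]
        simp [pvSplitAux]
      · have hp : List.isPrefixOf ['\n'] (c :: t) = false := by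
          simp [List.isPrefixOf]; exact fun hx => hc hx.symm
        rw [PySem.Chars.splitOn.go]
        rw [if_neg (by rw [hp]; exact Bool.false_ne_true)]
        rw [ih t (c :: cur) acc (by simpa using Nat.le_of_succ_le_succ h)]
        simp [pvSplitAux, hc]

theorem pv_splitOn (cs : List Char) :
    PySem.Chars.splitOn cs ['\n'] = pvSplitAux cs [] := by
  unfold PySem.Chars.splitOn
  rw [pv_splitOn_go (cs.length + 1) cs [] [] (Nat.le_succ _)]
  rfl

theorem pv_replace_go (fuel : Nat) :
    ∀ (l acc : List Char), l.length ≤ fuel →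
      PySem.Chars.replace.go ['\n', '#', ' '] ['\n', '#', '#', ' '] fuel l acc
        = acc.reverse ++ pvF l := by
  induction fuel with
  | zero =>
    intro l acc h
    have : l = [] := List.eq_nil_of_length_eq_zero (Nat.le_zero.mp h)
    subst this
    simp [PySem.Chars.replace.go, pvF]
  | succ n ih =>
    intro l acc h
    cases l with
    | nil => simp [PySem.Chars.replace.go, pvF]
    | cons c t =>
      by_cases hp : List.isPrefixOf ['\n', '#', ' '] (c :: t) = true
      · obtain ⟨t2, ht⟩ : ∃ t2, c :: t = '\n' :: '#' :: ' ' :: t2 := by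
          rw [List.isPrefixOf_iff_prefix] at hp
          obtain ⟨u, hu⟩ := hp
          exact ⟨u, hu.symm⟩
        obtain ⟨hc, ht'⟩ := List.cons_eq_cons.mp ht
        subst hc; subst ht'
        rw [PySem.Chars.replace.go]
        simp only [hp, if_true]
        rw [show List.drop (['\n', '#', ' '].length) ('\n' :: '#' :: ' ' :: t2) = t2 from rfl]
        rw [ih t2 (['\n', '#', '#', ' '].reverse ++ acc) (by simp [List.length_cons] at h; omega)]
        simp [pvF]
      · rw [PySem.Chars.replace.go]
        simp only [hp]
        rw [if_neg (by simp only [Bool.not_eq_true] at hp; simp)]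
        rw [ih t (c :: acc) (by simpa using Nat.le_of_succ_le_succ h)]
        by_cases hc : c = '\n'
        · subst hc
          have h2 : t.take 2 ≠ ['#', ' '] := by
            intro habs
            apply hp
            rw [List.isPrefixOf_iff_prefix]
            cases t with
            | nil => simp at habs
            | cons a u =>
              cases u with
              | nil => simp at habs
              | cons b v =>
                simp [List.take] at habs
                obtain ⟨ha, hb⟩ := habs
                subst ha; subst hb
                exact ⟨v, rfl⟩
          simp [pvF, h2]
        · simp [pvF, hc]

theorem pv_replace (cs : List Char) :
    PySem.Chars.replace cs "\n# ".toList "\n## ".toList = pvF cs := by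
  have h1 : "\n# ".toList = ['\n', '#', ' '] := rfl
  have h2 : "\n## ".toList = ['\n', '#', '#', ' '] := rfl
  rw [h1, h2]
  unfold PySem.Chars.replace
  rw [if_neg (by simp)]
  rw [pv_replace_go cs.length cs [] (le_refl _)]
  rfl

theorem pv_take2_tunl (t : List Char) :
    (pvTUNL t).take 2 = ['#', ' '] ↔ t.take 2 = ['#', ' '] := by
  cases t with
  | nil => simp [pvTUNL]
  | cons a u =>
    by_cases ha : a = '\n'
    · subst ha; simp [pvTUNL]
    · cases u with
      | nil => simp [pvTUNL, ha]
      | cons b v =>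
        by_cases hb : b = '\n'
        · subst hb; simp [pvTUNL, ha]
        · simp [pvTUNL, ha, hb]

theorem pv_splitAux_head (t : List Char) :
    ∀ cur, ∃ tl, pvSplitAux t cur = (cur.reverse ++ pvTUNL t) :: tl := by
  induction t with
  | nil => intro cur; exact ⟨[], by simp [pvSplitAux, pvTUNL]⟩
  | cons c t ih =>
    intro cur
    by_cases hc : c = '\n'
    · subst hc
      exact ⟨pvSplitAux t [], by simp [pvSplitAux, pvTUNL]⟩
    · obtain ⟨tl, htl⟩ := ih (c :: cur)
      refine ⟨tl, ?_⟩
      simp only [pvSplitAux, if_neg hc, htl, pvTUNL]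
      simp

-- join of g applied to ALL lines of the split-in-progress
theorem pv_join_map_g (t : List Char) :
    ∀ cur, PySem.Chars.join ['\n'] ((pvSplitAux t cur).map pvG)
      = (if (cur.reverse ++ pvTUNL t).take 2 = ['#', ' '] then ['#'] else []) ++ cur.reverse ++ pvF t := by
  induction t with
  | nil =>
    intro cur
    simp [pvSplitAux, pvG, pvF, pvTUNL, PySem.Chars.join_singleton]
    split_ifs <;> simp
  | cons c t ih =>
    intro cur
    by_cases hc : c = '\n'
    · subst hc
      simp only [pvSplitAux, if_true]
      obtain ⟨tl, htl⟩ := pv_splitAux_head t []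
      rw [htl]
      rw [List.map_cons, List.map_cons, PySem.Chars.join_cons_cons]
      rw [← List.map_cons, ← htl, ih []]
      simp only [List.reverse_nil, List.nil_append, List.append_nil, pvG, pvF, pvTUNL, if_true,
        pv_take2_tunl]
      split_ifs <;> simp_all
    · simp only [pvSplitAux, if_neg hc]
      rw [ih (c :: cur)]
      simp only [pvTUNL, if_neg hc, pvF]
      simp

theorem pv_main (cs : List Char) (l0 : List Char) (tl : List (List Char))
    (hsplit : pvSplitAux cs [] = l0 :: tl) :
    PySem.Chars.join ['\n'] (l0 :: tl.map pvG) = pvF cs := by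
  obtain ⟨tl2, htl2⟩ := pv_splitAux_head cs []
  rw [hsplit] at htl2
  obtain ⟨h0, htl⟩ := List.cons_eq_cons.mp htl2
  have hjoin : PySem.Chars.join ['\n'] ((l0 :: tl).map pvG)
      = (if l0.take 2 = ['#', ' '] then ['#'] else []) ++ PySem.Chars.join ['\n'] (l0 :: tl.map pvG) := by
    cases tl with
    | nil => simp [pvG, PySem.Chars.join_singleton]; split_ifs <;> simp
    | cons x xs =>
      simp only [List.map]
      rw [PySem.Chars.join_cons_cons, PySem.Chars.join_cons_cons]
      simp only [pvG]
      split_ifs <;> simp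
  have hall : PySem.Chars.join ['\n'] ((l0 :: tl).map pvG)
      = (if l0.take 2 = ['#', ' '] then ['#'] else []) ++ pvF cs := by
    rw [← hsplit, pv_join_map_g cs []]
    simp only [List.reverse_nil, List.nil_append]
    rw [h0]; simp
  rw [hjoin] at hall
  exact List.append_cancel_left hall

-- ===== VERDICT (by name: the statement is the Claim_ definition above) =====
theorem downgrade_headers_spec : Claim_equal_downgrade_headers := by
  intro content _
  unfold Spec_downgrade_headers downgrade_headers downgrade_headers_alt
  rw [PySem.Str.replace]
  rw [pv_replace content.toList]
  rw [pv_splitOn content.toList]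
  obtain ⟨tl, htl⟩ := pv_splitAux_head content.toList []
  rw [htl]
  simp only [PySem.List.foldl_append_singleton_eq_map]
  congr 1
  have : (fun line => if PySem.List.slice line (some 0) (some 2) = ['#', ' '] then '#' :: line else line) = pvG := by
    funext line
    rw [pv_slice_take]
    rfl
  rw [show [([].reverse ++ pvTUNL content.toList : List Char)]
        ++ List.map (fun line => if PySem.List.slice line (some 0) (some 2) = ['#', ' '] then '#' :: line else line) tl
      = ([].reverse ++ pvTUNL content.toList) :: tl.map pvG from by rw [this]; rfl]
  exact pv_main content.toList _ tl htl
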